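-- pv_equiv track=rewrite | github.com/SuThanhLoc/BaiTapCaNhan_AI | AI.py | DoiMotKhacNhau
-- ===== SOURCE A (Python) =====
-- def flatten(board):
--     return [tile for row in board for tile in row]
--
-- def DoiMotKhacNhau(board_state_dmkn):  # Giữ nguyên
--     seen_values = set()
--     flat_board_dmkn = flatten(board_state_dmkn)
--     if len(flat_board_dmkn) != 9: return False
--     for val_dmkn in flat_board_dmkn:
--         if not (0 <= val_dmkn <= 8): return False
--         if val_dmkn in seen_values: return False
--         seen_values.add(val_dmkn)
--     return len(seen_values) == 9
-- ===== SOURCE B (Python) =====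
-- def flatten(board):
--     return [tile for row in board for tile in row]
--
-- def DoiMotKhacNhau(board_state_dmkn):
--     flat = flatten(board_state_dmkn)
--     if len(flat) != 9:
--         return False
--     return sorted(flat) == list(range(9))
-- ===== Notes on version B (the rewrite author's own statement) =====
-- stated objective: simpler
-- what changed: Replaced the set-based single-pass membership/range scan with a length guard followed by comparing the sorted flat board to the canonical list(range(9)).
import Mathlib
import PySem

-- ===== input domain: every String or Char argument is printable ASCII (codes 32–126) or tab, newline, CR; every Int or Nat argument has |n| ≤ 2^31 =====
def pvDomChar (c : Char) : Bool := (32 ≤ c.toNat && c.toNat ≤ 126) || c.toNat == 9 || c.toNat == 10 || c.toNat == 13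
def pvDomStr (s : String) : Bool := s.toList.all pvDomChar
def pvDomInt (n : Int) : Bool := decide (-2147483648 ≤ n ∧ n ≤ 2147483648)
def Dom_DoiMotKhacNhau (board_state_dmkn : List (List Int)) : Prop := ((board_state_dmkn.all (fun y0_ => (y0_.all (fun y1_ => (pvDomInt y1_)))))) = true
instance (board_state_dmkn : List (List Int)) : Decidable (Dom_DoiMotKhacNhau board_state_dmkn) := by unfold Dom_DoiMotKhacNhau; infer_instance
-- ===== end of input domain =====

-- B replaces A's set-based single-pass scan with: flatten, length guard, then sorted(flat) == list(range(9)).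


-- ===== PORT A =====
def flattenA (board : List (List Int)) : List Int :=
  board.flatMap (fun row => row.map (fun tile => tile))

def dmknLoop : List Int → PySem.Set Int → Bool
  | [], seen => PySem.Set.len seen == 9
  | v :: rest, seen =>
    if !(decide (0 ≤ v) && decide (v ≤ 8)) then false
    else if PySem.Set.contains seen v then false
    else dmknLoop rest (PySem.Set.add seen v)

def DoiMotKhacNhau (board_state_dmkn : List (List Int)) : Bool :=
  let flat_board_dmkn := flattenA board_state_dmkn
  if flat_board_dmkn.length ≠ 9 then false
  else dmknLoop flat_board_dmkn PySem.Set.empty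

-- ===== PORT B =====
def flattenB (board : List (List Int)) : List Int :=
  board.flatMap (fun row => row.map (fun tile => tile))

def DoiMotKhacNhau_alt (board_state_dmkn : List (List Int)) : Bool :=
  let flat := flattenB board_state_dmkn
  if flat.length ≠ 9 then false
  else PySem.List.sorted flat (fun x => x) false == PySem.List.pyRange 0 9 1

-- ===== PRECONDITION & SPEC =====
def Spec_DoiMotKhacNhau (board_state_dmkn : List (List Int)) (out : Bool) : Prop := out = DoiMotKhacNhau_alt board_state_dmkn
instance (board_state_dmkn : List (List Int)) (out : Bool) : Decidable (Spec_DoiMotKhacNhau board_state_dmkn out) := by unfold Spec_DoiMotKhacNhau; infer_instance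

-- ===== CLAIM (what is proved, stated in full; the proofs are below) =====
def Claim_equal_DoiMotKhacNhau : Prop := ∀ (board_state_dmkn : List (List Int)), Dom_DoiMotKhacNhau board_state_dmkn → Spec_DoiMotKhacNhau board_state_dmkn (DoiMotKhacNhau board_state_dmkn)

-- ===== LEMMAS AND PROOFS =====

-- Loop invariant for A's scan.
theorem dmknLoop_iff (l : List Int) : ∀ (seen : List Int), seen.Nodup →
    (dmknLoop l seen = true ↔
      l.Nodup ∧ (∀ v ∈ l, 0 ≤ v ∧ v ≤ 8 ∧ v ∉ seen) ∧ seen.length + l.length = 9) := by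
  induction l with
  | nil =>
    intro seen _
    simp [dmknLoop, PySem.Set.len]
    omega
  | cons v rest ih =>
    intro seen hnd
    simp only [dmknLoop]
    by_cases hv : 0 ≤ v ∧ v ≤ 8
    · by_cases hmem : v ∈ seen
      · rw [if_neg (by simp [hv.1, hv.2]), if_pos (by simpa [PySem.Set.contains] using hmem)]
        constructor
        · intro h; exact absurd h (by simp)
        · rintro ⟨_, hall, _⟩
          exact absurd hmem (hall v (List.mem_cons_self)).2.2
      · have hadd : PySem.Set.add seen v = seen ++ [v] := by
          simp [PySem.Set.add, PySem.Set.contains, hmem]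
        have hnd' : (seen ++ [v]).Nodup := by
          rw [List.nodup_append]
          exact ⟨hnd, List.nodup_singleton v, by intro a ha b hb; rw [List.mem_singleton] at hb; subst hb; exact fun h => hmem (h ▸ ha)⟩
        rw [if_neg (by simp [hv.1, hv.2]), if_neg (by simpa [PySem.Set.contains] using hmem),
            hadd, ih (seen ++ [v]) hnd']
        constructor
        · rintro ⟨hndr, hall, hlen⟩
          refine ⟨List.nodup_cons.mpr ⟨?_, hndr⟩, ?_, ?_⟩
          · intro hvr
            exact (hall v hvr).2.2 (by simp)
          · intro u hu
            rcases List.mem_cons.mp hu with hu | hu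
            · subst hu; exact ⟨hv.1, hv.2, hmem⟩
            · obtain ⟨h1, h2, h3⟩ := hall u hu
              exact ⟨h1, h2, fun h => h3 (by simp [h])⟩
          · simp only [List.length_append, List.length_singleton] at hlen
            simp only [List.length_cons]; omega
        · rintro ⟨hndc, hall, hlen⟩
          obtain ⟨hvr, hndr⟩ := List.nodup_cons.mp hndc
          refine ⟨hndr, ?_, ?_⟩
          · intro u hu
            obtain ⟨h1, h2, h3⟩ := hall u (List.mem_cons_of_mem v hu)
            refine ⟨h1, h2, ?_⟩
            simp only [List.mem_append, List.mem_singleton]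
            rintro (h | h)
            · exact h3 h
            · exact hvr (h ▸ hu)
          · simp only [List.length_cons] at hlen
            simp only [List.length_append, List.length_singleton]; omega
    · rw [if_pos (by simp only [Bool.not_eq_eq_eq_not, Bool.not_true, Bool.and_eq_false_iff, decide_eq_false_iff_not, not_le]; omega)]
      constructor
      · intro h; exact absurd h (by simp)
      · rintro ⟨_, hall, _⟩
        obtain ⟨h1, h2, _⟩ := hall v List.mem_cons_self
        exact absurd ⟨h1, h2⟩ hv

def range9 : List Int := [0, 1, 2, 3, 4, 5, 6, 7, 8]

theorem pyRange9 : PySem.List.pyRange 0 9 1 = range9 := by decide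

theorem A_char (flat : List Int) (hlen : flat.length = 9) :
    (dmknLoop flat PySem.Set.empty = true ↔ flat.Nodup ∧ ∀ v ∈ flat, 0 ≤ v ∧ v ≤ 8) := by
  rw [show (PySem.Set.empty : PySem.Set Int) = ([] : List Int) from rfl,
      dmknLoop_iff flat [] List.nodup_nil]
  constructor
  · rintro ⟨h1, h2, _⟩
    exact ⟨h1, fun v hv => ⟨(h2 v hv).1, (h2 v hv).2.1⟩⟩
  · rintro ⟨h1, h2⟩
    exact ⟨h1, fun v hv => ⟨(h2 v hv).1, (h2 v hv).2, by simp⟩, by simp [hlen]⟩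

theorem B_char (flat : List Int) (hlen : flat.length = 9) :
    ((PySem.List.sorted flat (fun x => x) false == PySem.List.pyRange 0 9 1) = true ↔
      flat.Nodup ∧ ∀ v ∈ flat, 0 ≤ v ∧ v ≤ 8) := by
  rw [pyRange9, beq_iff_eq]
  constructor
  · intro h
    have hperm : flat.Perm range9 := by
      have := PySem.List.sorted_perm flat (fun x => x) false
      rw [h] at this
      exact this.symm
    constructor
    · exact hperm.nodup_iff.mpr (by decide)
    · intro v hv
      have hm : v ∈ range9 := hperm.mem_iff.mp hv
      simp only [range9, List.mem_cons, List.not_mem_nil, or_false] at hm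
      omega
  · rintro ⟨hnd, hall⟩
    have hsub : flat ⊆ range9 := by
      intro v hv
      have := hall v hv
      simp only [range9, List.mem_cons, List.not_mem_nil, or_false]
      omega
    have hsp : List.Subperm flat range9 := List.subperm_of_subset hnd hsub
    have hperm : range9.Perm flat :=
      (List.Subperm.perm_of_length_le hsp (by simp [hlen, range9])).symm
    exact PySem.List.sorted_eq_of_perm_of_pairwise_lt flat range9 (fun x => x) hperm (by decide)

-- ===== VERDICT (by name: the statement is the Claim_ definition above) =====
theorem DoiMotKhacNhau_spec : Claim_equal_DoiMotKhacNhau := by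
  intro b _
  unfold Spec_DoiMotKhacNhau DoiMotKhacNhau DoiMotKhacNhau_alt flattenA flattenB
  simp only
  by_cases hlen : (b.flatMap (fun row => row.map (fun tile => tile))).length = 9
  · rw [if_neg (by omega), if_neg (by omega)]
    rw [Bool.eq_iff_iff, A_char _ hlen, B_char _ hlen]
  · rw [if_pos hlen, if_pos hlen]
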